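-- pv_equiv track=rewrite | github.com/Arnav-Mishra/LeetCode-GeeksForGeeks-InterviewBit-Python-Solutions | Questions_by_Name/Maximum String.py | solve
-- ===== SOURCE A (Python) =====
-- def solve(A, B):
--     def swap(string,i,j):
--         s1=string[:i]
--         s2=string[i+1:j]
--         s3=string[j+1:]
--         return s1+string[j]+s2+string[i]+s3
--     def sswap(A,B,ans):
--         if B==0:
--             return ans[0]
--         for i in range(len(A)):
--             for j in range(i+1,len(A)):
--                 if A[j]>A[i]:
--                     temp=swap(A,i,j)
--                     if ans[0]<temp:
--                         ans[0]=temp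
--                     sswap(temp,B-1,ans)
--
--     ans=[A]
--     sswap(A,B,ans)
--     return ans[0]
-- ===== SOURCE B (Python) =====
-- def solve(A, B):
--     # BFS over distinct strings with a visited set: explores each reachable string once
--     best = A
--     seen = {A}
--     frontier = [A]
--     b = B
--     while b != 0 and frontier:
--         nxt = []
--         for s in frontier:
--             n = len(s)
--             for i in range(n):
--                 for j in range(i + 1, n):
--                     if s[j] > s[i]:
--                         t = s[:i] + s[j] + s[i + 1:j] + s[i] + s[j + 1:]
--                         if t not in seen:
--                             seen.add(t)
--                             if t > best:
--                                 best = t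
--                             nxt.append(t)
--         frontier = nxt
--         b -= 1
--     return best
-- ===== Notes on version B (the rewrite author's own statement) =====
-- stated objective: alternative
-- what changed: A's depth-first search re-explores the same intermediate string once per swap sequence leading to it; B does a breadth-first search over distinct reachable strings with a visited set, expanding each reachable string at most once while tracking the running maximum.
import Mathlib
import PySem

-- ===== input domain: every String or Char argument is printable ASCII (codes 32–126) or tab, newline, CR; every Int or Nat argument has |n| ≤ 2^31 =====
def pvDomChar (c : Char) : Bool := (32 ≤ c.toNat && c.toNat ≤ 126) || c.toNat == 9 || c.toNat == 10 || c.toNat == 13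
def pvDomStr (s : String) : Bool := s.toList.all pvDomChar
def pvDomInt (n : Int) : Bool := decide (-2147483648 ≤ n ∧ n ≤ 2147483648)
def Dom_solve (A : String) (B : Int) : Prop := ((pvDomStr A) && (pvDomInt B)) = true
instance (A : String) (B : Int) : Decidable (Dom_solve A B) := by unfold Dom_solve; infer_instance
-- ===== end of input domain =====

-- B replaces A's depth-first re-exploration of swap sequences by a breadth-first search over DISTINCT
-- reachable strings with a visited set (each reachable string expanded once), tracking the running maximum.


-- ===== PORT A =====
-- A's helper swap(string,i,j): it is called only with 0 ≤ i < j < len(string), where Python's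
-- slices string[:i], string[i+1:j], string[j+1:] are exactly these take/drop and string[k] is getD k.
def pvSwap (s : List Char) (i j : Nat) : List Char :=
  (s.take i) ++ [s.getD j ' '] ++ ((s.drop (i+1)).take (j - (i+1))) ++ [s.getD i ' '] ++ (s.drop (j+1))

-- Python's 'if ans[0] < temp: ans[0] = temp' as an update of the threaded ans[0]
def pvMaxL (a t : List Char) : List Char := if a < t then t else a

-- A's sswap, with the list ans (mutated in place in Python) threaded through and returned.
-- The Nat fuel only makes the nested recursion total: Python's recursion depth is finite on every
-- input (each improving swap strictly decreases the number of ascending pairs), and the equivalence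
-- theorem below holds for the fuel value solve feeds in.
def pvSswap : Nat → List Char → Int → List Char → List Char
  | 0, _, _, ans => ans
  | f+1, s, b, ans =>
    if b = 0 then ans
    else
      (List.range s.length).foldl (fun ans i =>
        (List.range' (i+1) (s.length - (i+1))).foldl (fun ans j =>
          if s.getD i ' ' < s.getD j ' ' then
            pvSswap f (pvSwap s i j) (b-1) (pvMaxL ans (pvSwap s i j))
          else ans) ans) ans

def solve (A : String) (B : Int) : String :=
  let s := A.toList
  String.ofList (pvSswap (s.length * s.length + 1) s B s)

-- ===== PORT B =====
-- Source B's innermost block 'if t not in seen: seen.add(t); if t > best: best = t; nxt.append(t)'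
-- acting on the state (seen, best, nxt)
def pvStep1 (st : PySem.Set (List Char) × List Char × List (List Char)) (t : List Char) :
    PySem.Set (List Char) × List Char × List (List Char) :=
  if t ∈ st.1 then st
  else (PySem.Set.add st.1 t, pvMaxL st.2.1 t, st.2.2 ++ [t])

-- body of 'for s in frontier': the two index loops (t's slice expression is pvSwap, see above)
def pvLevel (st : PySem.Set (List Char) × List Char × List (List Char)) (s : List Char) :
    PySem.Set (List Char) × List Char × List (List Char) :=
  (List.range s.length).foldl (fun st i =>
    (List.range' (i+1) (s.length - (i+1))).foldl (fun st j =>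
      if s.getD i ' ' < s.getD j ' ' then pvStep1 st (pvSwap s i j)
      else st) st) st

-- Source B's 'while b != 0 and frontier:' loop; the Nat fuel only makes it total (the loop runs at
-- most ascending-pair-count(A)+1 times in Python), the theorem holds for the fuel solve_alt feeds in.
def pvBfs : Nat → Int → List (List Char) → PySem.Set (List Char) → List Char → List Char
  | 0, _, _, _, best => best
  | f+1, b, frontier, seen, best =>
    if b = 0 ∨ frontier = [] then best
    else
      let st := frontier.foldl pvLevel (seen, best, ([] : List (List Char)))
      pvBfs f (b-1) st.2.2 st.1 st.2.1

def solve_alt (A : String) (B : Int) : String :=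
  let s := A.toList
  String.ofList (pvBfs (s.length * s.length + 1) B [s] (PySem.Set.ofList [s]) s)

-- ===== PRECONDITION & SPEC =====
def Spec_solve (A : String) (B : Int) (out : String) : Prop := out = solve_alt A B
instance (A : String) (B : Int) (out : String) : Decidable (Spec_solve A B out) := by unfold Spec_solve; infer_instance

-- ===== CLAIM (what is proved, stated in full; the proofs are below) =====
def Claim_equal_solve : Prop := ∀ (A : String) (B : Int), Dom_solve A B → Spec_solve A B (solve A B)

-- ===== LEMMAS AND PROOFS =====

-- the list of all improving-swap successors of s, in loop order
def pvSuccs (s : List Char) : List (List Char) :=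
  (List.range s.length).flatMap (fun i =>
    ((List.range' (i+1) (s.length - (i+1))).filter (fun j => s.getD i ' ' < s.getD j ' ')).map
      (fun j => pvSwap s i j))

-- strings reachable from s by 1..k improving swaps (as a list with duplicates; only membership matters)
def pvR : Nat → List Char → List (List Char)
  | 0, _ => []
  | k+1, s => (pvSuccs s).flatMap (fun t => t :: pvR k t)

-- number of exploration levels actually performed with fuel f and budget b
def pvM (f : Nat) (b : Int) : Nat := if b < 0 then f else min f b.toNat

-- x is reachable from a in at most k improving swaps
def pvS (a : List Char) (k : Nat) (x : List Char) : Prop := x = a ∨ x ∈ pvR k a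

def pvSprev (a : List Char) : Nat → List Char → Prop
  | 0, _ => False
  | j+1, x => pvS a j x

lemma pv_foldl_filter_map {α β γ : Type} (l : List α) (p : α → Bool) (g : α → β)
    (h : γ → β → γ) (a : γ) :
    ((l.filter p).map g).foldl h a = l.foldl (fun a x => if p x then h a (g x) else a) a := by
  induction l generalizing a with
  | nil => rfl
  | cons x t ih =>
    simp only [List.filter_cons]
    by_cases hp : p x <;> simp [hp, ih]

lemma pv_foldl_congr {α β : Type} (l : List α) (f g : β → α → β) (a : β)
    (h : ∀ (a' : β) (x : α), f a' x = g a' x) : l.foldl f a = l.foldl g a := by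
  induction l generalizing a with
  | nil => rfl
  | cons x t ih => rw [List.foldl_cons, List.foldl_cons, h, ih]

lemma pv_loops_eq {σ : Type} (s : List Char) (h : σ → List Char → σ) (st : σ) :
    ((List.range s.length).foldl (fun st i =>
      (List.range' (i+1) (s.length - (i+1))).foldl (fun st j =>
        if s.getD i ' ' < s.getD j ' ' then h st (pvSwap s i j) else st) st) st)
    = (pvSuccs s).foldl h st := by
  unfold pvSuccs
  rw [List.foldl_flatMap]
  apply pv_foldl_congr
  intro st' i
  rw [pv_foldl_filter_map]
  apply pv_foldl_congr
  intro a' j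
  simp

lemma pv_sswap_succ (f : Nat) (s : List Char) (b : Int) (ans : List Char) (hb : ¬ b = 0) :
    pvSswap (f+1) s b ans
      = (pvSuccs s).foldl (fun a t => pvSswap f t (b-1) (pvMaxL a t)) ans := by
  simp only [pvSswap, if_neg hb]
  exact pv_loops_eq s (fun a t => pvSswap f t (b-1) (pvMaxL a t)) ans

lemma pvM_zero (b : Int) : pvM 0 b = 0 := by
  unfold pvM; split <;> simp

lemma pvM_succ (f : Nat) (b : Int) (hb : ¬ b = 0) : pvM (f+1) b = pvM f (b-1) + 1 := by
  unfold pvM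
  rcases lt_trichotomy b 0 with h | h | h
  · rw [if_pos h, if_pos (by omega)]
  · exact absurd h hb
  · rw [if_neg (by omega), if_neg (by omega)]
    omega

lemma pv_sswap_eq (f : Nat) : ∀ (s : List Char) (b : Int) (ans : List Char),
    pvSswap f s b ans = (pvR (pvM f b) s).foldl pvMaxL ans := by
  induction f with
  | zero => intro s b ans; rw [pvM_zero]; rfl
  | succ f ih =>
    intro s b ans
    by_cases hb : b = 0
    · subst hb
      have : pvM (f+1) 0 = 0 := by unfold pvM; simp
      rw [this]
      rfl
    · rw [pv_sswap_succ f s b ans hb, pvM_succ f b hb]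
      show _ = (pvR (pvM f (b-1) + 1) s).foldl pvMaxL ans
      rw [show pvR (pvM f (b-1) + 1) s = (pvSuccs s).flatMap (fun t => t :: pvR (pvM f (b-1)) t) from rfl]
      rw [List.foldl_flatMap]
      apply pv_foldl_congr
      intro a t
      rw [List.foldl_cons, ih]

-- order facts about pvMaxL
lemma pv_le_maxL_left (a t : List Char) : a ≤ pvMaxL a t := by
  unfold pvMaxL; split
  · exact le_of_lt (by assumption)
  · exact le_refl a

lemma pv_le_maxL_right (a t : List Char) : t ≤ pvMaxL a t := by
  unfold pvMaxL; split
  · exact le_refl t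
  · exact not_lt.mp (by assumption)

lemma pv_maxL_cases (a t : List Char) : pvMaxL a t = a ∨ pvMaxL a t = t := by
  unfold pvMaxL; split
  · exact Or.inr rfl
  · exact Or.inl rfl

lemma pv_foldl_maxL_spec (l : List (List Char)) : ∀ a : List Char,
    (l.foldl pvMaxL a = a ∨ l.foldl pvMaxL a ∈ l) ∧
    a ≤ l.foldl pvMaxL a ∧ ∀ x ∈ l, x ≤ l.foldl pvMaxL a := by
  induction l with
  | nil => intro a; simp
  | cons t l ih =>
    intro a
    obtain ⟨hmem, hle, hall⟩ := ih (pvMaxL a t)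
    refine ⟨?_, ?_, ?_⟩
    · rcases hmem with h | h
      · rcases pv_maxL_cases a t with h2 | h2
        · exact Or.inl (by rw [List.foldl_cons, h, h2])
        · exact Or.inr (by rw [List.foldl_cons, h, h2]; exact List.mem_cons_self)
      · exact Or.inr (List.mem_cons_of_mem t (by rw [List.foldl_cons]; exact h))
    · exact le_trans (pv_le_maxL_left a t) hle
    · intro x hx
      rcases List.mem_cons.mp hx with h | h
      · subst h; exact le_trans (pv_le_maxL_right a x) hle
      · exact hall x h

-- membership recurrences for pvR / pvS
lemma pv_mem_R_succ (k : Nat) (s x : List Char) :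
    x ∈ pvR (k+1) s ↔ ∃ t ∈ pvSuccs s, x = t ∨ x ∈ pvR k t := by
  simp [pvR, List.mem_flatMap]

lemma pv_R_mono (k : Nat) : ∀ (s x : List Char), x ∈ pvR k s → x ∈ pvR (k+1) s := by
  induction k with
  | zero => intro s x h; simp [pvR] at h
  | succ k ih =>
    intro s x h
    rw [pv_mem_R_succ] at h
    rw [pv_mem_R_succ]
    obtain ⟨t, ht, h⟩ := h
    exact ⟨t, ht, h.imp id (ih t x)⟩

lemma pv_R_front (k : Nat) : ∀ (s x : List Char),
    x ∈ pvR (k+1) s ↔ x ∈ pvR k s ∨ ∃ y, (y = s ∨ y ∈ pvR k s) ∧ x ∈ pvSuccs y := by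
  induction k with
  | zero =>
    intro s x
    simp [pvR]
  | succ k ih =>
    intro s x
    rw [pv_mem_R_succ]
    constructor
    · rintro ⟨t, ht, h | h⟩
      · exact Or.inl ((pv_mem_R_succ k s x).mpr ⟨t, ht, Or.inl h⟩)
      · rw [ih] at h
        rcases h with h | ⟨y, hy | hy, hxy⟩
        · exact Or.inl (by rw [pv_mem_R_succ]; exact ⟨t, ht, Or.inr h⟩)
        · subst hy
          exact Or.inr ⟨y, Or.inr (by rw [pv_mem_R_succ]; exact ⟨y, ht, Or.inl rfl⟩), hxy⟩
        · exact Or.inr ⟨y, Or.inr (by rw [pv_mem_R_succ]; exact ⟨t, ht, Or.inr hy⟩), hxy⟩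
    · rintro (h | ⟨y, hy | hy, hxy⟩)
      · rw [pv_mem_R_succ] at h
        obtain ⟨t, ht, h⟩ := h
        exact ⟨t, ht, h.imp id (pv_R_mono k t x)⟩
      · subst hy
        exact ⟨x, hxy, Or.inl rfl⟩
      · rw [pv_mem_R_succ] at hy
        obtain ⟨t, ht, hy⟩ := hy
        refine ⟨t, ht, Or.inr ?_⟩
        rw [ih]
        rcases hy with hy | hy
        · subst hy
          exact Or.inr ⟨y, Or.inl rfl, hxy⟩
        · exact Or.inr ⟨y, Or.inr hy, hxy⟩

lemma pv_S_mono (a : List Char) (k : Nat) (x : List Char) (h : pvS a k x) : pvS a (k+1) x :=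
  h.imp id (pv_R_mono k a x)

lemma pv_S_front (a : List Char) (k : Nat) (x : List Char) :
    pvS a (k+1) x ↔ pvS a k x ∨ ∃ y, pvS a k y ∧ x ∈ pvSuccs y := by
  simp only [pvS]
  rw [pv_R_front, or_assoc]

lemma pv_S_mono_many (a : List Char) (k : Nat) (x : List Char) (h : pvS a k x) :
    ∀ m : Nat, pvS a (k+m) x := by
  intro m
  induction m with
  | zero => exact h
  | succ m ih => exact pv_S_mono a (k+m) x ih

lemma pv_S_stable (a : List Char) (k : Nat) (h : ∀ x, pvS a (k+1) x → pvS a k x) :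
    ∀ (m : Nat) (x : List Char), pvS a (k+m) x → pvS a k x := by
  intro m
  induction m with
  | zero => intro x hx; exact hx
  | succ m ih =>
    intro x hx
    rw [show k + (m+1) = (k+m) + 1 from rfl, pv_S_front] at hx
    rcases hx with hx | ⟨y, hy, hxy⟩
    · exact ih x hx
    · exact h x ((pv_S_front a k x).mpr (Or.inr ⟨y, ih y hy, hxy⟩))

lemma pv_level_eq (st : PySem.Set (List Char) × List Char × List (List Char)) (s : List Char) :
    pvLevel st s = (pvSuccs s).foldl pvStep1 st := by
  unfold pvLevel
  exact pv_loops_eq s pvStep1 st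

lemma pv_levels_eq (frontier : List (List Char))
    (st : PySem.Set (List Char) × List Char × List (List Char)) :
    frontier.foldl pvLevel st = (frontier.flatMap pvSuccs).foldl pvStep1 st := by
  rw [List.foldl_flatMap]
  apply pv_foldl_congr
  intro st' s
  exact pv_level_eq st' s

lemma pv_step1_fold (L : List (List Char)) :
    ∀ (seen : PySem.Set (List Char)) (best : List Char) (nxt : List (List Char)),
    best ∈ seen → (∀ x ∈ seen, x ≤ best) →
    (∀ x, x ∈ (L.foldl pvStep1 (seen, best, nxt)).1 ↔ (x ∈ seen ∨ x ∈ L)) ∧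
    (∀ x, x ∈ (L.foldl pvStep1 (seen, best, nxt)).2.2 ↔ (x ∈ nxt ∨ (x ∈ L ∧ x ∉ seen))) ∧
    (L.foldl pvStep1 (seen, best, nxt)).2.1 ∈ (L.foldl pvStep1 (seen, best, nxt)).1 ∧
    (∀ x ∈ (L.foldl pvStep1 (seen, best, nxt)).1, x ≤ (L.foldl pvStep1 (seen, best, nxt)).2.1) := by
  induction L with
  | nil =>
    intro seen best nxt hbm hbu
    refine ⟨by simp, by simp, hbm, hbu⟩
  | cons t L ih =>
    intro seen best nxt hbm hbu
    rw [List.foldl_cons]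
    by_cases ht : t ∈ seen
    · rw [show pvStep1 (seen, best, nxt) t = (seen, best, nxt) by unfold pvStep1; simp [ht]]
      obtain ⟨h1, h2, h3, h4⟩ := ih seen best nxt hbm hbu
      have hxt : ∀ x : List Char, x = t → x ∈ seen := fun x hx => hx ▸ ht
      refine ⟨?_, ?_, h3, h4⟩
      · intro x
        rw [h1 x]
        simp only [List.mem_cons]
        constructor
        · tauto
        · rintro (h | h | h)
          · exact Or.inl h
          · exact Or.inl (hxt x h)
          · exact Or.inr h
      · intro x
        rw [h2 x]
        simp only [List.mem_cons]
        constructor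
        · rintro (h | ⟨h, hn⟩)
          · exact Or.inl h
          · exact Or.inr ⟨Or.inr h, hn⟩
        · rintro (h | ⟨h | h, hn⟩)
          · exact Or.inl h
          · exact absurd (hxt x h) hn
          · exact Or.inr ⟨h, hn⟩
    · rw [show pvStep1 (seen, best, nxt) t
            = (PySem.Set.add seen t, pvMaxL best t, nxt ++ [t]) by unfold pvStep1; simp [ht]]
      have hbm' : pvMaxL best t ∈ PySem.Set.add seen t := by
        rcases pv_maxL_cases best t with h | h <;> rw [h, PySem.Set.mem_add]
        · exact Or.inl hbm
        · exact Or.inr rfl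
      have hbu' : ∀ x ∈ PySem.Set.add seen t, x ≤ pvMaxL best t := by
        intro x hx
        rw [PySem.Set.mem_add] at hx
        rcases hx with hx | rfl
        · exact le_trans (hbu x hx) (pv_le_maxL_left best t)
        · exact pv_le_maxL_right best x
      obtain ⟨h1, h2, h3, h4⟩ := ih (PySem.Set.add seen t) (pvMaxL best t) (nxt ++ [t]) hbm' hbu'
      refine ⟨?_, ?_, h3, h4⟩
      · intro x
        rw [h1 x, PySem.Set.mem_add]
        simp only [List.mem_cons]
        tauto
      · intro x
        rw [h2 x, PySem.Set.mem_add]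
        simp only [List.mem_append, List.mem_cons, List.not_mem_nil, or_false]
        constructor
        · rintro ((h | h) | ⟨h, hn⟩)
          · exact Or.inl h
          · subst h
            exact Or.inr ⟨Or.inl rfl, ht⟩
          · exact Or.inr ⟨Or.inr h, fun hs => hn (Or.inl hs)⟩
        · rintro (h | ⟨h | h, hn⟩)
          · exact Or.inl (Or.inl h)
          · subst h
            exact Or.inl (Or.inr rfl)
          · by_cases hxt : x = t
            · exact Or.inl (Or.inr hxt)
            · exact Or.inr ⟨h, fun hs => by rcases hs with hs | hs; exact hn hs; exact hxt hs⟩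

lemma pv_bfs_inv (a : List Char) : ∀ (f : Nat) (b : Int) (k : Nat)
    (frontier : List (List Char)) (seen : PySem.Set (List Char)) (best : List Char),
    (∀ x, x ∈ seen ↔ pvS a k x) →
    (∀ x, x ∈ frontier ↔ (pvS a k x ∧ ¬ pvSprev a k x)) →
    best ∈ seen → (∀ x ∈ seen, x ≤ best) →
    pvS a (k + pvM f b) (pvBfs f b frontier seen best) ∧
      (∀ x, pvS a (k + pvM f b) x → x ≤ pvBfs f b frontier seen best) := by
  intro f
  induction f with
  | zero =>
    intro b k frontier seen best hseen _ hbm hbu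
    rw [pvM_zero]
    exact ⟨(hseen best).mp hbm, fun x hx => hbu x ((hseen x).mpr hx)⟩
  | succ f ih =>
    intro b k frontier seen best hseen hfr hbm hbu
    by_cases hstop : b = 0 ∨ frontier = []
    · rw [show pvBfs (f+1) b frontier seen best = best by unfold pvBfs; rw [if_pos hstop]]
      rcases hstop with hb | hemp
      · subst hb
        have : pvM (f+1) 0 = 0 := by unfold pvM; simp
        rw [this]
        exact ⟨(hseen best).mp hbm, fun x hx => hbu x ((hseen x).mpr hx)⟩
      · -- frontier empty: the reachable set has stabilised at level k
        have hsub : ∀ x, pvS a k x → pvSprev a k x := by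
          intro x hx
          by_contra hn
          have : x ∈ frontier := (hfr x).mpr ⟨hx, hn⟩
          simp [hemp] at this
        match k, hsub with
        | 0, hsub => exact absurd (hsub a (Or.inl rfl)) (fun h => h)
        | j+1, hsub =>
          have hstab : ∀ (m : Nat) (x : List Char), pvS a (j + m) x → pvS a j x :=
            pv_S_stable a j hsub
          refine ⟨pv_S_mono_many a (j+1) best ((hseen best).mp hbm) (pvM (f+1) b),
            fun x hx => hbu x ((hseen x).mpr ?_)⟩
          have : pvS a j x := hstab (1 + pvM (f+1) b) x
            (by rw [show j + (1 + pvM (f+1) b) = j + 1 + pvM (f+1) b by omega]; exact hx)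
          exact pv_S_mono a j x this
    · have hb : ¬ b = 0 := fun h => hstop (Or.inl h)
      rw [show pvBfs (f+1) b frontier seen best
            = pvBfs f (b-1) (frontier.foldl pvLevel (seen, best, [])).2.2
                (frontier.foldl pvLevel (seen, best, [])).1
                (frontier.foldl pvLevel (seen, best, [])).2.1 by
            show (if b = 0 ∨ frontier = [] then best
              else pvBfs f (b-1) (frontier.foldl pvLevel (seen, best, [])).2.2
                (frontier.foldl pvLevel (seen, best, [])).1
                (frontier.foldl pvLevel (seen, best, [])).2.1) = _
            rw [if_neg hstop]]
      rw [pv_levels_eq]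
      set L := frontier.flatMap pvSuccs with hL
      obtain ⟨h1, h2, h3, h4⟩ := pv_step1_fold L seen best [] hbm hbu
      have hmemL : ∀ x, x ∈ L ↔ ∃ y, (pvS a k y ∧ ¬ pvSprev a k y) ∧ x ∈ pvSuccs y := by
        intro x
        rw [hL, List.mem_flatMap]
        constructor
        · rintro ⟨y, hy, hxy⟩; exact ⟨y, (hfr y).mp hy, hxy⟩
        · rintro ⟨y, hy, hxy⟩; exact ⟨y, (hfr y).mpr hy, hxy⟩
      -- successors of a level-(k-1) string are already in level ≤ k
      have hsuccprev : ∀ x y, pvSprev a k y → x ∈ pvSuccs y → pvS a k x := by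
        intro x y hy hxy
        match k, hy with
        | j+1, hy => exact (pv_S_front a j x).mpr (Or.inr ⟨y, hy, hxy⟩)
      have hseen' : ∀ x, x ∈ (L.foldl pvStep1 (seen, best, [])).1 ↔ pvS a (k+1) x := by
        intro x
        rw [h1 x, hseen x, hmemL x, pv_S_front]
        constructor
        · rintro (h | ⟨y, ⟨hy, _⟩, hxy⟩)
          · exact Or.inl h
          · exact Or.inr ⟨y, hy, hxy⟩
        · rintro (h | ⟨y, hy, hxy⟩)
          · exact Or.inl h
          · by_cases hyp : pvSprev a k y
            · exact Or.inl (hsuccprev x y hyp hxy)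
            · exact Or.inr ⟨y, ⟨hy, hyp⟩, hxy⟩
      have hfr' : ∀ x, x ∈ (L.foldl pvStep1 (seen, best, [])).2.2 ↔
          (pvS a (k+1) x ∧ ¬ pvSprev a (k+1) x) := by
        intro x
        rw [h2 x, hmemL x]
        simp only [List.not_mem_nil, false_or]
        constructor
        · rintro ⟨⟨y, ⟨hy, hyp⟩, hxy⟩, hxs⟩
          refine ⟨(pv_S_front a k x).mpr (Or.inr ⟨y, hy, hxy⟩), ?_⟩
          intro h
          exact ((hseen x).mpr h) |> hxs
        · rintro ⟨hx, hxs⟩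
          have hxnk : ¬ pvS a k x := fun h => hxs h
          rw [pv_S_front] at hx
          rcases hx with hx | ⟨y, hy, hxy⟩
          · exact absurd hx hxnk
          · refine ⟨⟨y, ⟨hy, ?_⟩, hxy⟩, fun h => hxnk ((hseen x).mp h)⟩
            intro hyp
            exact hxnk (hsuccprev x y hyp hxy)
      have := ih (b-1) (k+1) (L.foldl pvStep1 (seen, best, [])).2.2
        (L.foldl pvStep1 (seen, best, [])).1 (L.foldl pvStep1 (seen, best, [])).2.1
        hseen' hfr' h3 h4
      rw [pvM_succ f b hb, show k + (pvM f (b-1) + 1) = (k+1) + pvM f (b-1) by omega]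
      exact this

-- ===== VERDICT (by name: the statement is the Claim_ definition above) =====
theorem solve_spec : Claim_equal_solve := by
  unfold Claim_equal_solve
  intro A B _
  unfold Spec_solve solve solve_alt
  refine congrArg String.ofList ?_
  generalize A.toList = s
  -- A's side: the fold of max over everything reachable in ≤ pvM (n²+1) B swaps
  rw [pv_sswap_eq (s.length * s.length + 1) s B s]
  obtain ⟨hAmem, hAle, hAall⟩ :=
    pv_foldl_maxL_spec (pvR (pvM (s.length * s.length + 1) B) s) s
  -- B's side: BFS invariant from the initial state
  have hseen0 : ∀ x, x ∈ PySem.Set.ofList [s] ↔ pvS s 0 x := by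
    intro x
    rw [PySem.Set.mem_ofList]
    simp [pvS, pvR]
  have hfr0 : ∀ x, x ∈ [s] ↔ (pvS s 0 x ∧ ¬ pvSprev s 0 x) := by
    intro x
    simp [pvS, pvR, pvSprev]
  have hbm0 : s ∈ PySem.Set.ofList [s] := by rw [PySem.Set.mem_ofList]; simp
  have hbu0 : ∀ x ∈ PySem.Set.ofList [s], x ≤ s := by
    intro x hx
    rw [PySem.Set.mem_ofList] at hx
    simp at hx
    subst hx
    exact le_refl x
  obtain ⟨hBmem, hBall⟩ := pv_bfs_inv s (s.length * s.length + 1) B 0 [s]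
    (PySem.Set.ofList [s]) s hseen0 hfr0 hbm0 hbu0
  rw [Nat.zero_add] at hBmem hBall
  -- both sides are the maximum of {s} ∪ pvR (pvM (n²+1) B) s
  have hrA_le : (pvR (pvM (s.length * s.length + 1) B) s).foldl pvMaxL s
      ≤ pvBfs (s.length * s.length + 1) B [s] (PySem.Set.ofList [s]) s :=
    hBall _ (hAmem.imp id id)
  have hrB_le : pvBfs (s.length * s.length + 1) B [s] (PySem.Set.ofList [s]) s
      ≤ (pvR (pvM (s.length * s.length + 1) B) s).foldl pvMaxL s := by
    rcases hBmem with h | h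
    · rw [h]; exact hAle
    · exact hAall _ h
  exact le_antisymm hrA_le hrB_le
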